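-- pv_equiv track=rewrite | github.com/MihaiCatalinVoicu/Pollymarket | src/ops/promotion_policy.py | promotion_blocker_classes
-- ===== SOURCE A (Python) =====
-- from typing import Iterable
--
-- def promotion_blocker_classes(blockers: Iterable[str] | None) -> list[str]:
--     classes: list[str] = []
--     seen: set[str] = set()
--     for blocker in blockers or []:
--         lowered = str(blocker or "").strip().lower()
--         if lowered.startswith("missing_"):
--             label = "data"
--         elif lowered in {"insufficient_shadow_days", "insufficient_micro_live_days"}:
--             label = "sample"
--         elif lowered in {"negative_quote_edge", "negative_spread_capture", "rewards_only_pnl", "market_concentration_high"}: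
--             label = "performance"
--         elif lowered in {
--             "heartbeat_unhealthy",
--             "geoblock_failed",
--             "auth_invalid",
--             "reconciliation_not_clean",
--             "inventory_path_unvalidated",
--             "hard_risk_governor_failure",
--         }:
--             label = "safety"
--         else:
--             label = "misc"
--         if label not in seen:
--             seen.add(label)
--             classes.append(label)
--     return classes
-- ===== SOURCE B (Python) =====
-- _TABLE = {
--     "insufficient_shadow_days": "sample",
--     "insufficient_micro_live_days": "sample",
--     "negative_quote_edge": "performance",
--     "negative_spread_capture": "performance",
--     "rewards_only_pnl": "performance",
--     "market_concentration_high": "performance",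
--     "heartbeat_unhealthy": "safety",
--     "geoblock_failed": "safety",
--     "auth_invalid": "safety",
--     "reconciliation_not_clean": "safety",
--     "inventory_path_unvalidated": "safety",
--     "hard_risk_governor_failure": "safety",
-- }
--
-- _LABELS = ("data", "sample", "performance", "safety", "misc")
--
--
-- def _classify(blocker):
--     lowered = str(blocker or "").strip().lower()
--     if lowered.startswith("missing_"):
--         return "data"
--     return _TABLE.get(lowered, "misc")
--
--
-- def promotion_blocker_classes(blockers):
--     labels = [_classify(b) for b in (blockers or [])]
--     firsts = [(labels.index(lbl), lbl) for lbl in _LABELS if lbl in labels]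
--     firsts.sort(key=lambda t: t[0])
--     return [lbl for _, lbl in firsts]
-- ===== Notes on version B (the rewrite author's own statement) =====
-- stated objective: alternative
-- what changed: Instead of one classify-and-dedup loop with a seen-set, B maps each blocker through a table-lookup classifier, then for each of the five fixed category labels finds its first-occurrence index in the label list and sorts the present labels by that index.
import Mathlib
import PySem

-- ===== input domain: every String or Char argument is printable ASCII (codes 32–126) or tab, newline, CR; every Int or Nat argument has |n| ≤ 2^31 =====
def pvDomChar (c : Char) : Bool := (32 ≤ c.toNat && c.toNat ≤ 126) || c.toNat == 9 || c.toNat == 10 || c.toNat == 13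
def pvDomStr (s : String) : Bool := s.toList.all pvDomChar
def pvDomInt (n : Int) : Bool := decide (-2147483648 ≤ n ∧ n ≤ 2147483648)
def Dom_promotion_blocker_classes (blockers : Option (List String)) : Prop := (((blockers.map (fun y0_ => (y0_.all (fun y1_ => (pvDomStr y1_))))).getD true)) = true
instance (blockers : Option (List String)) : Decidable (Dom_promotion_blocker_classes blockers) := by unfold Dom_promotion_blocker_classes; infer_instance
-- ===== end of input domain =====

-- B replaces A's classify-and-dedup loop with a seen-set by a table-lookup classifier, a map
-- pass, and a per-category first-occurrence-index search over the five fixed labels sorted by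
-- index: a different algorithm of the same cost (objective: alternative).

-- ===== PORT A =====
-- one loop carrying (classes, seen); classification chain inline, append only when label unseen
def promotion_blocker_classes (blockers : Option (List String)) : List String :=
  (((blockers.getD []).foldl (fun (st : List String × PySem.Set String) blocker =>
      let lowered := PySem.Str.lower (PySem.Str.strip (if blocker = "" then "" else blocker))
      let label :=
        if PySem.Str.startswith lowered "missing_" then "data"
        else if PySem.Set.contains (PySem.Set.ofList ["insufficient_shadow_days", "insufficient_micro_live_days"]) lowered then "sample"
        else if PySem.Set.contains (PySem.Set.ofList ["negative_quote_edge", "negative_spread_capture", "rewards_only_pnl", "market_concentration_high"]) lowered then "performance"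
        else if PySem.Set.contains (PySem.Set.ofList ["heartbeat_unhealthy", "geoblock_failed", "auth_invalid", "reconciliation_not_clean", "inventory_path_unvalidated", "hard_risk_governor_failure"]) lowered then "safety"
        else "misc"
      if PySem.Set.contains st.2 label then st
      else (st.1 ++ [label], PySem.Set.add st.2 label))
    ([], PySem.Set.empty))).1

-- ===== PORT B =====
def pbcTable : PySem.Dict String String := PySem.Dict.mk
  [("insufficient_shadow_days", "sample"),
   ("insufficient_micro_live_days", "sample"),
   ("negative_quote_edge", "performance"),
   ("negative_spread_capture", "performance"),
   ("rewards_only_pnl", "performance"),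
   ("market_concentration_high", "performance"),
   ("heartbeat_unhealthy", "safety"),
   ("geoblock_failed", "safety"),
   ("auth_invalid", "safety"),
   ("reconciliation_not_clean", "safety"),
   ("inventory_path_unvalidated", "safety"),
   ("hard_risk_governor_failure", "safety")]

def pbcLabels : List String := ["data", "sample", "performance", "safety", "misc"]

def pbcClassify (blocker : String) : String :=
  let lowered := PySem.Str.lower (PySem.Str.strip (if blocker = "" then "" else blocker))
  if PySem.Str.startswith lowered "missing_" then "data"
  else PySem.Dict.getD pbcTable lowered "misc"

def promotion_blocker_classes_alt (blockers : Option (List String)) : List String :=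
  let labels := (blockers.getD []).map pbcClassify
  -- [(labels.index(lbl), lbl) for lbl in _LABELS if lbl in labels]; the filter guarantees
  -- index? is some, so the .getD 0 default is never used
  let firsts := (pbcLabels.filter (fun l => labels.contains l)).map
      (fun l => ((PySem.List.index? labels l).getD 0, l))
  (PySem.List.sorted firsts (fun t => t.1) false).map (fun t => t.2)

-- ===== PRECONDITION & SPEC =====
def Spec_promotion_blocker_classes (blockers : Option (List String)) (out : List String) : Prop := out = promotion_blocker_classes_alt blockers
instance (blockers : Option (List String)) (out : List String) : Decidable (Spec_promotion_blocker_classes blockers out) := by unfold Spec_promotion_blocker_classes; infer_instance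

-- ===== CLAIM (what is proved, stated in full; the proofs are below) =====
def Claim_equal_promotion_blocker_classes : Prop := ∀ (blockers : Option (List String)), Dom_promotion_blocker_classes blockers → Spec_promotion_blocker_classes blockers (promotion_blocker_classes blockers)

-- ===== LEMMAS AND PROOFS =====

-- A's branch cascade over a lowered string equals B's table lookup
theorem pbc_table_eq (s : String) :
    (if PySem.Set.contains (PySem.Set.ofList ["insufficient_shadow_days", "insufficient_micro_live_days"]) s then "sample"
     else if PySem.Set.contains (PySem.Set.ofList ["negative_quote_edge", "negative_spread_capture", "rewards_only_pnl", "market_concentration_high"]) s then "performance"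
     else if PySem.Set.contains (PySem.Set.ofList ["heartbeat_unhealthy", "geoblock_failed", "auth_invalid", "reconciliation_not_clean", "inventory_path_unvalidated", "hard_risk_governor_failure"]) s then "safety"
     else "misc") = PySem.Dict.getD pbcTable s "misc" := by
  by_cases h1 : s = "insufficient_shadow_days"; · subst h1; decide
  by_cases h2 : s = "insufficient_micro_live_days"; · subst h2; decide
  by_cases h3 : s = "negative_quote_edge"; · subst h3; decide
  by_cases h4 : s = "negative_spread_capture"; · subst h4; decide
  by_cases h5 : s = "rewards_only_pnl"; · subst h5; decide
  by_cases h6 : s = "market_concentration_high"; · subst h6; decide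
  by_cases h7 : s = "heartbeat_unhealthy"; · subst h7; decide
  by_cases h8 : s = "geoblock_failed"; · subst h8; decide
  by_cases h9 : s = "auth_invalid"; · subst h9; decide
  by_cases h10 : s = "reconciliation_not_clean"; · subst h10; decide
  by_cases h11 : s = "inventory_path_unvalidated"; · subst h11; decide
  by_cases h12 : s = "hard_risk_governor_failure"; · subst h12; decide
  simp [pbcTable, PySem.Dict.getD, PySem.Dict.get?, PySem.Set.contains,
    PySem.Set.ofList, PySem.Set.add, PySem.Set.empty,
    Ne.symm h1, Ne.symm h2, Ne.symm h3, Ne.symm h4, Ne.symm h5, Ne.symm h6,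
    Ne.symm h7, Ne.symm h8, Ne.symm h9, Ne.symm h10, Ne.symm h11, Ne.symm h12,
    h1, h2, h3, h4, h5, h6, h7, h8, h9, h10, h11, h12]

-- the cascade applied to B's lowered string is B's classifier
theorem pbc_classify_eq (blocker : String) :
    (if PySem.Str.startswith (PySem.Str.lower (PySem.Str.strip (if blocker = "" then "" else blocker))) "missing_" then "data"
     else if PySem.Set.contains (PySem.Set.ofList ["insufficient_shadow_days", "insufficient_micro_live_days"]) (PySem.Str.lower (PySem.Str.strip (if blocker = "" then "" else blocker))) then "sample"
     else if PySem.Set.contains (PySem.Set.ofList ["negative_quote_edge", "negative_spread_capture", "rewards_only_pnl", "market_concentration_high"]) (PySem.Str.lower (PySem.Str.strip (if blocker = "" then "" else blocker))) then "performance"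
     else if PySem.Set.contains (PySem.Set.ofList ["heartbeat_unhealthy", "geoblock_failed", "auth_invalid", "reconciliation_not_clean", "inventory_path_unvalidated", "hard_risk_governor_failure"]) (PySem.Str.lower (PySem.Str.strip (if blocker = "" then "" else blocker))) then "safety"
     else "misc") = pbcClassify blocker := by
  rw [pbc_table_eq]; rfl

-- every label the table lookup produces is one of the five fixed labels
theorem pbc_classify_mem (blocker : String) : pbcClassify blocker ∈ pbcLabels := by
  rw [← pbc_classify_eq]
  split_ifs <;> simp [pbcLabels]

-- A's loop, started on a duplicated accumulator, computes foldl Set.add on the mapped labels.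
theorem pbc_loop_eq (f : String → String)
    (g : List String × PySem.Set String → String → List String × PySem.Set String)
    (hg : ∀ st b, g st b = if PySem.Set.contains st.2 (f b) then st
        else (st.1 ++ [f b], PySem.Set.add st.2 (f b)))
    (xs : List String) (acc : PySem.Set String) :
    xs.foldl g (acc, acc)
      = ((xs.map f).foldl PySem.Set.add acc, (xs.map f).foldl PySem.Set.add acc) := by
  induction xs generalizing acc with
  | nil => rfl
  | cons b xs ih =>
    simp only [List.foldl_cons, List.map_cons, hg]
    by_cases h : PySem.Set.contains acc (f b)
    · have hadd : PySem.Set.add acc (f b) = acc := by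
        simp_all [PySem.Set.add, PySem.Set.contains]
      simp only [h, if_true, hadd]
      exact ih acc
    · have hadd : PySem.Set.add acc (f b) = acc ++ [f b] := by
        simp_all [PySem.Set.add, PySem.Set.contains]
      simp only [h]
      rw [hadd]
      exact ih (acc ++ [f b])

-- A computes the ordered dedup of the mapped label list
theorem pbc_A_eq_dedup (blockers : Option (List String)) :
    promotion_blocker_classes blockers
      = PySem.List.dedup ((blockers.getD []).map pbcClassify) := by
  unfold promotion_blocker_classes
  rw [show (([], PySem.Set.empty) : List String × PySem.Set String)
        = ((PySem.Set.empty : PySem.Set String), (PySem.Set.empty : PySem.Set String)) from rfl]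
  rw [pbc_loop_eq pbcClassify _ ?_ (blockers.getD []) PySem.Set.empty]
  · simp [PySem.List.dedup_eq_ofList, PySem.Set.ofList_eq_foldl, PySem.Set.empty]
  · intro st b
    simp only [pbc_classify_eq]

-- dedup keeps first occurrences, so it is strictly increasing in first-occurrence index
theorem pbc_dedup_pairwise (xs : List String) :
    (PySem.List.dedup xs).Pairwise
      (fun a b => (PySem.List.index? xs a).getD 0 < (PySem.List.index? xs b).getD 0) := by
  induction xs using List.reverseRecOn with
  | nil => simp [PySem.List.dedup, PySem.Set.ofList]
  | append_singleton xs x ih =>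
    have hdd : PySem.List.dedup (xs ++ [x]) = PySem.Set.add (PySem.List.dedup xs) x := by
      simp [PySem.List.dedup_eq_ofList, PySem.Set.ofList_eq_foldl]
    have hmem : ∀ a, a ∈ PySem.List.dedup xs → a ∈ xs := by
      intro a ha; exact (PySem.List.mem_dedup xs a).1 ha
    have hkeep : ∀ a, a ∈ xs →
        PySem.List.index? (xs ++ [x]) a = PySem.List.index? xs a :=
      fun a ha => PySem.List.index?_append_of_mem [x] ha
    have hcontains : PySem.Set.contains (PySem.List.dedup xs) x = true ↔ x ∈ xs := by
      simp [PySem.Set.contains]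
    by_cases hx : PySem.Set.contains (PySem.List.dedup xs) x
    · have heq : PySem.Set.add (PySem.List.dedup xs) x = PySem.List.dedup xs := by
        simp [PySem.Set.add]
        exact hcontains.1 hx
      rw [hdd, heq]
      refine ih.imp_of_mem ?_
      intro a b ha hb hab
      rw [hkeep a (hmem a ha), hkeep b (hmem b hb)]; exact hab
    · have heq : PySem.Set.add (PySem.List.dedup xs) x = PySem.List.dedup xs ++ [x] := by
        simp [PySem.Set.add]
        exact fun hc => hx (hcontains.2 hc)
      rw [hdd, heq]
      rw [List.pairwise_append]
      refine ⟨ih.imp_of_mem ?_, by simp, ?_⟩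
      · intro a b ha hb hab
        rw [hkeep a (hmem a ha), hkeep b (hmem b hb)]; exact hab
      · intro a ha b hb
        have hb' : b = x := by simpa using hb
        subst hb'
        have hax : a ∈ xs := hmem a ha
        have hxnot : b ∉ xs := fun hc => hx (hcontains.2 hc)
        rw [hkeep a hax, PySem.List.index?_append_singleton_self xs b hxnot]
        obtain ⟨k, hk⟩ := Option.isSome_iff_exists.mp
          ((PySem.List.index?_isSome_iff xs a).2 hax)
        obtain ⟨hklt, -, -⟩ := PySem.List.getElem_of_index?_eq_some hk
        rw [hk]
        simpa using hklt

-- dedup of the label list is a permutation of the labels kept by B's filter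
theorem pbc_perm (labels : List String) (hsub : ∀ a ∈ labels, a ∈ pbcLabels) :
    (PySem.List.dedup labels).Perm (pbcLabels.filter (fun l => labels.contains l)) := by
  have h1 : (PySem.List.dedup labels).Nodup := PySem.List.nodup_dedup labels
  have h2 : (pbcLabels.filter (fun l => labels.contains l)).Nodup := by
    refine List.Nodup.filter _ ?_
    unfold pbcLabels; decide
  rw [List.perm_ext_iff_of_nodup h1 h2]
  intro a
  simp only [PySem.List.mem_dedup, List.mem_filter, List.contains_iff_mem]
  constructor
  · intro ha; exact ⟨hsub a ha, by simpa using ha⟩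
  · intro ⟨_, ha⟩; simpa using ha

-- the first-index/sort computation on any label list drawn from pbcLabels is its ordered dedup
theorem pbc_sorted_eq (labels : List String) (hsub : ∀ a ∈ labels, a ∈ pbcLabels) :
    (PySem.List.sorted ((pbcLabels.filter (fun l => labels.contains l)).map
        (fun l => ((PySem.List.index? labels l).getD 0, l))) (fun t => t.1) false).map
        (fun t => t.2)
      = PySem.List.dedup labels := by
  have hperm : ((PySem.List.dedup labels).map
        (fun l => ((PySem.List.index? labels l).getD 0, l))).Perm
      ((pbcLabels.filter (fun l => labels.contains l)).map
        (fun l => ((PySem.List.index? labels l).getD 0, l))) :=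
    (pbc_perm labels hsub).map _
  have hpw : ((PySem.List.dedup labels).map
      (fun l => ((PySem.List.index? labels l).getD 0, l))).Pairwise
      (fun a b => a.1 < b.1) := by
    rw [List.pairwise_map]
    exact pbc_dedup_pairwise labels
  have hs := PySem.List.sorted_eq_of_perm_of_pairwise_lt _ _
    (fun t : Nat × String => t.1) hperm hpw
  refine (congrArg (List.map (fun t : Nat × String => t.2)) hs).trans ?_
  rw [List.map_map]
  simp [Function.comp_def]

-- B computes the ordered dedup of the mapped label list
theorem pbc_B_eq_dedup (blockers : Option (List String)) :
    promotion_blocker_classes_alt blockers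
      = PySem.List.dedup ((blockers.getD []).map pbcClassify) := by
  unfold promotion_blocker_classes_alt
  exact pbc_sorted_eq ((blockers.getD []).map pbcClassify)
    (fun a ha => by
      obtain ⟨b, -, rfl⟩ := List.mem_map.1 ha
      exact pbc_classify_mem b)

-- ===== VERDICT (by name: the statement is the Claim_ definition above) =====
theorem promotion_blocker_classes_spec : Claim_equal_promotion_blocker_classes := by
  intro blockers _
  unfold Spec_promotion_blocker_classes
  rw [pbc_A_eq_dedup, pbc_B_eq_dedup]
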